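-- pv_equiv track=rewrite | github.com/umakiyer/HackerRank-Challenge | task2.py | solution
-- ===== SOURCE A (Python) =====
-- def solution(R,V):
--     # write your code in Python 3.6
--     # given two non-empty zero-indexed arrays R and V consisting of N integers, returns the minimum initial account balance each bank must have to ensure that all transfers can be completed.
--     # for example, given R = [BAABA] and V = [2,4,1,1,2], the function should return [2,4].
--     # given R="ABAB" and V = [10,5,10,15], the function should return [0,15].
--     # Write an efficient algorithm for the following assumptions:
--     # string R and array V are bith of length N
--     # N is an integer within the range [1..100,000]
--     # each element of arrays R is a string that can have one of the following values: "A", "B"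
--     # each element of arrays V is an integer within the range [1..10,000]
--     # find the number of transfers
--     transfers = len(R)
--     # find the number of transfers to bank A
--     transfers_to_bank_A = 0
--     # find the number of transfers to bank B
--     transfers_to_bank_B = 0
--     # find the number of transfers from bank A
--     transfers_from_bank_A = 0
--     # find the number of transfers from bank B
--     transfers_from_bank_B = 0
--     # find the number of transfers to bank A
--     for i in range(transfers):
--         if R[i] == "A":
--             transfers_to_bank_A += 1
--     # find the number of transfers to bank B
--     for i in range(transfers):
--         if R[i] == "B":
--             transfers_to_bank_B += 1
--     # find the number of transfers from bank A
--     transfers_from_bank_A = transfers - transfers_to_bank_A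
--     # find the number of transfers from bank B
--     transfers_from_bank_B = transfers - transfers_to_bank_B
--     # find the minimum initial account balance each bank must have to ensure that all transfers can be completed.
--     # find the minimum initial account balance for bank A
--     min_account_balance_bank_A = 0
--     # find the minimum initial account balance for bank B
--     min_account_balance_bank_B = 0
--     # find the minimum initial account balance for bank A
--     for i in range(transfers):
--         if R[i] == "A":
--             min_account_balance_bank_A += V[i]
--         else:
--             min_account_balance_bank_A -= V[i]
--     # find the minimum initial account balance for bank B
--     for i in range(transfers):
--         if R[i] == "B":
--             min_account_balance_bank_B += V[i]
--         else:
--             min_account_balance_bank_B -= V[i]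
--     # find the minimum initial account balance for bank A
--     if min_account_balance_bank_A < 0:
--         min_account_balance_bank_A = 0
--     # find the minimum initial account balance for bank B
--     if min_account_balance_bank_B < 0:
--         min_account_balance_bank_B = 0
--     # return the minimum initial account balance each bank must have to ensure that all transfers can be completed.
--     return [min_account_balance_bank_A, min_account_balance_bank_B]
-- ===== SOURCE B (Python) =====
-- def solution(R, V):
--     # one pass: index transfers by recipient bank in a dict, keep a running grand total,
--     # then derive each bank's clamped balance as inflow minus everything-else from the index
--     sums = {}
--     total = 0
--     for r, v in zip(R, V):
--         sums[r] = sums.get(r, 0) + v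
--         total += v
--     return [max(0, sums.get(b, 0) - (total - sums.get(b, 0))) for b in "AB"]
-- ===== Notes on version B (the rewrite author's own statement) =====
-- stated objective: simpler
-- what changed: Replaces A's four separate index loops and branch clamps by a single group-by pass that builds a dict of per-bank inflow plus a running grand total, then derives each bank's clamped balance from the index as inflow minus everything-else; the dead counting loops disappear.
import Mathlib
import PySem

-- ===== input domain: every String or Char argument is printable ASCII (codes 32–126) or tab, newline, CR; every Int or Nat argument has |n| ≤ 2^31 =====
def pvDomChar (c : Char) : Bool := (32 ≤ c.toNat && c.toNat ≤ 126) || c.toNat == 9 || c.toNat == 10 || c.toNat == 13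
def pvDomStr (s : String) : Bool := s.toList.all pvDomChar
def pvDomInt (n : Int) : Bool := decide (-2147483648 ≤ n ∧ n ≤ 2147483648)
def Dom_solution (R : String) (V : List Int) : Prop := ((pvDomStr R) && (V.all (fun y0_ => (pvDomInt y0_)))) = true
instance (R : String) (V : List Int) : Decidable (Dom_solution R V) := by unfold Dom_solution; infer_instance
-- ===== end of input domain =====

-- B replaces A's four index loops by one group-by pass into a dict plus a running total; objective: simpler.

-- ===== PORT A =====
def solution (R : String) (V : List Int) : List Int :=
  let transfers : Int := PySem.Str.len R
  let _transfers_to_bank_A : Int :=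
    (PySem.List.pyRange 0 transfers 1).foldl
      (fun acc i => if (PySem.Str.pyGet? R i).getD ' ' == 'A' then acc + 1 else acc) 0
  let _transfers_to_bank_B : Int :=
    (PySem.List.pyRange 0 transfers 1).foldl
      (fun acc i => if (PySem.Str.pyGet? R i).getD ' ' == 'B' then acc + 1 else acc) 0
  let _transfers_from_bank_A : Int := transfers - _transfers_to_bank_A
  let _transfers_from_bank_B : Int := transfers - _transfers_to_bank_B
  let minA : Int :=
    (PySem.List.pyRange 0 transfers 1).foldl
      (fun acc i => if (PySem.Str.pyGet? R i).getD ' ' == 'A'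
                    then acc + (PySem.List.pyGet? V i).getD 0
                    else acc - (PySem.List.pyGet? V i).getD 0) 0
  let minB : Int :=
    (PySem.List.pyRange 0 transfers 1).foldl
      (fun acc i => if (PySem.Str.pyGet? R i).getD ' ' == 'B'
                    then acc + (PySem.List.pyGet? V i).getD 0
                    else acc - (PySem.List.pyGet? V i).getD 0) 0
  let minA := if minA < 0 then 0 else minA
  let minB := if minB < 0 then 0 else minB
  [minA, minB]

-- ===== PORT B =====
def solution_alt (R : String) (V : List Int) : List Int :=
  let st := (R.toList.zip V).foldl
      (fun st p => (st.1.insert p.1 (st.1.getD p.1 0 + p.2), st.2 + p.2))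
      ((PySem.Dict.empty : PySem.Dict Char Int), (0 : Int))
  ['A', 'B'].map (fun b => max 0 (st.1.getD b 0 - (st.2 - st.1.getD b 0)))

-- ===== PRECONDITION & SPEC =====
-- Pre_ excludes exactly the inputs where A raises IndexError (V shorter than R).
def Pre_solution (R : String) (V : List Int) : Prop := R.toList.length ≤ V.length
instance (R : String) (V : List Int) : Decidable (Pre_solution R V) := by unfold Pre_solution; infer_instance
def pvWitness_solution : String × List Int := ("BAABA", [2, 4, 1, 1, 2])

def Spec_solution (R : String) (V : List Int) (out : List Int) : Prop := out = solution_alt R V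
instance (R : String) (V : List Int) (out : List Int) : Decidable (Spec_solution R V out) := by unfold Spec_solution; infer_instance

-- ===== CLAIM (what is proved, stated in full; the proofs are below) =====
def Claim_equal_solution : Prop := ∀ (R : String) (V : List Int), Dom_solution R V → Pre_solution R V → Spec_solution R V (solution R V)

-- ===== LEMMAS AND PROOFS =====

-- A's per-index add/subtract loop, read through the zip of the two lists.
lemma loopA_eq_zip (cs : List Char) (vs : List Int) (h : cs.length ≤ vs.length) (c : Char) :
    (PySem.List.pyRange 0 (cs.length : Int) 1).foldl
      (fun acc i => if (PySem.List.pyGet? cs i).getD ' ' == c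
                    then acc + (PySem.List.pyGet? vs i).getD 0
                    else acc - (PySem.List.pyGet? vs i).getD 0) 0
  = (cs.zip vs).foldl (fun acc p => if p.1 == c then acc + p.2 else acc - p.2) 0 := by
  have hz : (((cs.zip vs).length : Nat) : Int) = ((cs.length : Nat) : Int) := by
    simp [List.length_zip]; omega
  have step1 := PySem.List.foldl_congr_mem (PySem.List.pyRange 0 (cs.length : Int) 1)
      (fun acc i => if (PySem.List.pyGet? cs i).getD ' ' == c
                    then acc + (PySem.List.pyGet? vs i).getD 0
                    else acc - (PySem.List.pyGet? vs i).getD 0)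
      (fun acc j => (fun (acc : Int) (p : Char × Int) =>
                      if p.1 == c then acc + p.2 else acc - p.2) acc
                      (PySem.List.pyGetD (cs.zip vs) j (' ', 0)))
      0 ?_
  · rw [step1]
    have step2 := PySem.List.foldl_pyRange_pyGetD' (cs.zip vs) ((' ', (0 : Int)))
        (fun acc p => if p.1 == c then acc + p.2 else acc - p.2) 0 (a := 0) (by omega)
    rw [hz] at step2
    simpa using step2
  · intro acc i hi
    rw [PySem.List.mem_pyRange_one] at hi
    obtain ⟨h0, hlt⟩ := hi
    have e1 : PySem.List.pyGet? cs i = some cs[i.toNat] :=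
      PySem.List.pyGet?_eq_some_getElem _ h0 (by omega)
    have e2 : PySem.List.pyGet? vs i = some vs[i.toNat] :=
      PySem.List.pyGet?_eq_some_getElem _ h0 (by omega)
    have e3 : PySem.List.pyGetD (cs.zip vs) i (' ', 0) = (cs.zip vs)[i.toNat] :=
      PySem.List.pyGetD_eq_getElem (cs.zip vs) (' ', 0) h0 (by simp [List.length_zip]; omega)
    simp only [e1, e2, e3, List.getElem_zip, Option.getD_some]

-- evaluate A's zip fold algebraically
lemma zipfold_eval (l : List (Char × Int)) (c : Char) (acc : Int) :
    l.foldl (fun acc p => if p.1 == c then acc + p.2 else acc - p.2) acc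
  = acc + 2 * ((l.filter (fun p => p.1 == c)).map Prod.snd).sum - (l.map Prod.snd).sum := by
  induction l generalizing acc with
  | nil => simp
  | cons p l ih =>
    simp only [List.foldl_cons]
    rw [ih]
    by_cases hc : p.1 == c <;> simp [hc] <;> ring

-- B's group-by fold: the dict indexes the per-character sums, the second component is the grand total.
lemma groupfold_spec (l : List (Char × Int)) (d : PySem.Dict Char Int) (t : Int) (c : Char) :
    ((l.foldl (fun st p => (st.1.insert p.1 (st.1.getD p.1 0 + p.2), st.2 + p.2)) (d, t)).1.getD c 0
      = d.getD c 0 + ((l.filter (fun p => p.1 == c)).map Prod.snd).sum)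
  ∧ (l.foldl (fun st p => (st.1.insert p.1 (st.1.getD p.1 0 + p.2), st.2 + p.2)) (d, t)).2
      = t + (l.map Prod.snd).sum := by
  induction l generalizing d t with
  | nil => simp
  | cons p l ih =>
    simp only [List.foldl_cons]
    obtain ⟨ih1, ih2⟩ := ih (d.insert p.1 (d.getD p.1 0 + p.2)) (t + p.2)
    refine ⟨?_, by rw [ih2]; simp; ring⟩
    rw [ih1, PySem.Dict.getD_insert]
    by_cases hc : c = p.1
    · simp [hc]; ring
    · have : (p.1 == c) = false := by simp [Ne.symm hc]
      simp [hc, this]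

-- ===== VERDICT (by name: the statement is the Claim_ definition above) =====
theorem solution_spec : Claim_equal_solution := by
  intro R V _ hpre
  have hpre' : R.toList.length ≤ V.length := hpre
  unfold Spec_solution solution solution_alt
  show [(if (PySem.List.pyRange 0 ((R.toList.length : Nat) : Int) 1).foldl
            (fun acc i => if (PySem.List.pyGet? R.toList i).getD ' ' == 'A'
                          then acc + (PySem.List.pyGet? V i).getD 0
                          else acc - (PySem.List.pyGet? V i).getD 0) 0 < 0 then 0
         else (PySem.List.pyRange 0 ((R.toList.length : Nat) : Int) 1).foldl
            (fun acc i => if (PySem.List.pyGet? R.toList i).getD ' ' == 'A'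
                          then acc + (PySem.List.pyGet? V i).getD 0
                          else acc - (PySem.List.pyGet? V i).getD 0) 0),
        (if (PySem.List.pyRange 0 ((R.toList.length : Nat) : Int) 1).foldl
            (fun acc i => if (PySem.List.pyGet? R.toList i).getD ' ' == 'B'
                          then acc + (PySem.List.pyGet? V i).getD 0
                          else acc - (PySem.List.pyGet? V i).getD 0) 0 < 0 then 0
         else (PySem.List.pyRange 0 ((R.toList.length : Nat) : Int) 1).foldl
            (fun acc i => if (PySem.List.pyGet? R.toList i).getD ' ' == 'B'
                          then acc + (PySem.List.pyGet? V i).getD 0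
                          else acc - (PySem.List.pyGet? V i).getD 0) 0)]
      = ['A', 'B'].map (fun b =>
          max 0
            (((R.toList.zip V).foldl
                (fun st p => (st.1.insert p.1 (st.1.getD p.1 0 + p.2), st.2 + p.2))
                ((PySem.Dict.empty : PySem.Dict Char Int), (0 : Int))).1.getD b 0
             - (((R.toList.zip V).foldl
                  (fun st p => (st.1.insert p.1 (st.1.getD p.1 0 + p.2), st.2 + p.2))
                  ((PySem.Dict.empty : PySem.Dict Char Int), (0 : Int))).2
                - ((R.toList.zip V).foldl
                    (fun st p => (st.1.insert p.1 (st.1.getD p.1 0 + p.2), st.2 + p.2))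
                    ((PySem.Dict.empty : PySem.Dict Char Int), (0 : Int))).1.getD b 0)))
  rw [loopA_eq_zip R.toList V hpre' 'A', loopA_eq_zip R.toList V hpre' 'B',
      zipfold_eval, zipfold_eval]
  obtain ⟨hA1, hA2⟩ := groupfold_spec (R.toList.zip V) PySem.Dict.empty 0 'A'
  obtain ⟨hB1, _⟩ := groupfold_spec (R.toList.zip V) PySem.Dict.empty 0 'B'
  simp only [List.map_cons, List.map_nil, hA1, hA2, hB1, PySem.Dict.getD_empty]
  simp only [List.cons.injEq, and_true]
  constructor <;> · simp only [max_def]; split_ifs <;> omega
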